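-- pv_equiv track=rewrite | github.com/yohanse/A2SV | B_Special_Numbers.py | find_special_number
-- ===== SOURCE A (Python) =====
-- MODULO = 10**9 + 7
--
-- def find_special_number(n, k):
--     # Convert k to binary base and treat as a number in base n
--     special_number = 0
--     power_of_ten = 1
--     while k:  # while k not zero
--         remainder = k % 2
--         # build the number in base n
--         special_number = (special_number + remainder * power_of_ten) % MODULO
--         power_of_ten = (power_of_ten * n) % MODULO
--         k //= 2
--     return special_number
-- ===== SOURCE B (Python) =====
-- MODULO = 10**9 + 7
--
-- def find_special_number(n, k):
--     # Pass 1: extract binary digits of k least-significant-first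
--     digits = []
--     while k:
--         digits.append(k % 2)
--         k //= 2
--     # Pass 2: Horner's rule over the digits most-significant-first
--     result = 0
--     for d in reversed(digits):
--         result = (result * n + d) % MODULO
--     return result
-- ===== Notes on version B (the rewrite author's own statement) =====
-- stated objective: alternative
-- what changed: B replaces the single positional-weight loop (running power-of-n accumulator) by a collect-binary-digits pass followed by a Horner-rule fold most-significant-first, maintaining only one running accumulator.
import Mathlib
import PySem

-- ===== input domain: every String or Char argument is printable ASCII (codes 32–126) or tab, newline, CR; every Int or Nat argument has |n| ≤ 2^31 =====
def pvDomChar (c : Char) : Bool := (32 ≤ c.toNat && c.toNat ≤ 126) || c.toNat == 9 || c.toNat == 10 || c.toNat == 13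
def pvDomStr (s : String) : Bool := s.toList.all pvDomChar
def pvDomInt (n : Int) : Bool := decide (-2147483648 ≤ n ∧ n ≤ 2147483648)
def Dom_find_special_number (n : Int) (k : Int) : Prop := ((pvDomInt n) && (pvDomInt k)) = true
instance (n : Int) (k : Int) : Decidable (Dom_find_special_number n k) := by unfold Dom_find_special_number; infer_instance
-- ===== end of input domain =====

-- B replaces A's single positional-weight loop (running power-of-n) by a collect-binary-digits
-- pass followed by a Horner-rule fold most-significant-first (objective: alternative).

def pvMOD : Int := 1000000007

-- ===== PORT A =====
-- A's while-loop; the `0 < k` guard only makes the recursion total (for k < 0 both Pythons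
-- diverge identically; for k >= 0 the guard coincides with Python's `while k`).
def pvLoopA (n k special_number power_of_ten : Int) : Int :=
  if _h : 0 < k then
    pvLoopA n (PySem.Int.floordiv k 2)
      (PySem.Int.mod (special_number + (PySem.Int.mod k 2) * power_of_ten) pvMOD)
      (PySem.Int.mod (power_of_ten * n) pvMOD)
  else special_number
termination_by k.toNat
decreasing_by
  have h2 : PySem.Int.floordiv k 2 = k / 2 := PySem.Int.floordiv_eq_ediv_of_pos (by omega)
  simp only [h2]; omega

def find_special_number (n : Int) (k : Int) : Int := pvLoopA n k 0 1

-- ===== PORT B =====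
-- Pass 1 of Source B: the digit-collection loop (same `%2` / `//2` extraction, totalised the same way).
def pvDigitsB (k : Int) : List Int :=
  if _h : 0 < k then PySem.Int.mod k 2 :: pvDigitsB (PySem.Int.floordiv k 2) else []
termination_by k.toNat
decreasing_by
  have h2 : PySem.Int.floordiv k 2 = k / 2 := PySem.Int.floordiv_eq_ediv_of_pos (by omega)
  simp only [h2]; omega

-- Pass 2 of Source B: Horner fold over the reversed digit list.
def find_special_number_alt (n : Int) (k : Int) : Int :=
  (pvDigitsB k).reverse.foldl (fun result d => PySem.Int.mod (result * n + d) pvMOD) 0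

-- ===== PRECONDITION & SPEC =====
def Spec_find_special_number (n : Int) (k : Int) (out : Int) : Prop := out = find_special_number_alt n k
instance (n : Int) (k : Int) (out : Int) : Decidable (Spec_find_special_number n k out) := by
  unfold Spec_find_special_number; infer_instance

-- ===== CLAIM (what is proved, stated in full; the proofs are below) =====
def Claim_equal_find_special_number : Prop := ∀ (n : Int) (k : Int), Dom_find_special_number n k → Spec_find_special_number n k (find_special_number n k)

-- ===== LEMMAS AND PROOFS =====

-- Horner value of the digit list, as a foldr (= B's foldl over the reversed list).
def pvHorner (n k : Int) : Int :=
  (pvDigitsB k).foldr (fun d result => PySem.Int.mod (result * n + d) pvMOD) 0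

lemma pvAlt_eq_horner (n k : Int) : find_special_number_alt n k = pvHorner n k := by
  unfold find_special_number_alt pvHorner
  rw [List.foldl_reverse]

lemma pvHorner_pos (n k : Int) (hk : 0 < k) :
    pvHorner n k = PySem.Int.mod (pvHorner n (PySem.Int.floordiv k 2) * n + PySem.Int.mod k 2) pvMOD := by
  unfold pvHorner
  rw [pvDigitsB, dif_pos hk]
  rfl

lemma pvMod_is_emod (a : Int) : PySem.Int.mod a pvMOD = a % pvMOD :=
  PySem.Int.mod_eq_emod_of_pos (by norm_num [pvMOD])

lemma pvHorner_emod (n k : Int) : pvHorner n k % pvMOD = pvHorner n k := by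
  by_cases hk : 0 < k
  · rw [pvHorner_pos n k hk, pvMod_is_emod, Int.emod_emod_of_dvd _ dvd_rfl]
  · unfold pvHorner; rw [pvDigitsB, dif_neg hk]; rfl

-- Main invariant: A's loop state equals sp + pw · Horner(rest), reduced mod pvMOD,
-- provided sp is already reduced.
lemma pvLoop_eq (n : Int) : ∀ (k sp pw : Int), sp % pvMOD = sp →
    pvLoopA n k sp pw = (sp + pw * pvHorner n k) % pvMOD := by
  intro k
  induction k using pvDigitsB.induct with
  | case1 k hk ih =>
    intro sp pw hsp
    rw [pvLoopA, dif_pos hk]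
    rw [ih _ _ (by rw [pvMod_is_emod, Int.emod_emod_of_dvd _ dvd_rfl])]
    rw [pvHorner_pos n k hk]
    simp only [pvMod_is_emod]
    set r := PySem.Int.mod k 2
    set F := pvHorner n (PySem.Int.floordiv k 2)
    have h1 : (sp + r * pw) % pvMOD ≡ sp + r * pw [ZMOD pvMOD] :=
      Int.emod_emod_of_dvd _ dvd_rfl
    have h2 : (pw * n) % pvMOD ≡ pw * n [ZMOD pvMOD] :=
      Int.emod_emod_of_dvd _ dvd_rfl
    have h3 : (F * n + r) % pvMOD ≡ F * n + r [ZMOD pvMOD] :=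
      Int.emod_emod_of_dvd _ dvd_rfl
    have hL : (sp + r * pw) % pvMOD + (pw * n) % pvMOD * F ≡
        sp + (pw * ((F * n + r) % pvMOD)) [ZMOD pvMOD] := by
      calc (sp + r * pw) % pvMOD + (pw * n) % pvMOD * F
          ≡ (sp + r * pw) + pw * n * F [ZMOD pvMOD] := h1.add (h2.mul_right F)
        _ = sp + pw * (F * n + r) := by ring
        _ ≡ sp + pw * ((F * n + r) % pvMOD) [ZMOD pvMOD] :=
            (Int.ModEq.refl sp).add ((h3.symm).mul_left pw)
    exact hL
  | case2 k hk =>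
    intro sp pw hsp
    rw [pvLoopA, dif_neg hk]
    unfold pvHorner
    rw [pvDigitsB, dif_neg hk]
    simpa using hsp.symm

-- ===== VERDICT (by name: the statement is the Claim_ definition above) =====
theorem find_special_number_spec : Claim_equal_find_special_number := by
  intro n k _
  unfold Spec_find_special_number find_special_number
  rw [pvAlt_eq_horner, pvLoop_eq n k 0 1 rfl]
  rw [zero_add, one_mul, pvHorner_emod]
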